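-- pv_equiv track=rewrite | github.com/pritamchandra/Foobar | 2.2.py | solution
-- ===== SOURCE A (Python) =====
-- def solution(L):
--     n = len(L)
--     L = sorted(L)
--     # sort the list as the largest number would be beginning with the
--     # largest digit of the subarray whose sum is divisible by 3
--
--     D = [x % 3 for x in L] # stores the numbers reduced modulo 3
--
--     T = [ [0 for m in range(3)] for i in range(n) ]
--     pi = [ [(None, None) for m in range(3)] for i in range(n) ]
--     # define T[i][m] as the longest subsequence ending in L[i] congruent to
--     # m mod 3, and pi[i][m] stores the parent of i in that subsequence
--
--     def relax(i, j, m, k):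
--         if T[j][k] != 0:
--             if (1 + T[j][k]) >= T[i][m]:
--                 T[i][m] = 1 + T[j][k]
--                 pi[i][m] = (j, k)
--
--     for i in range(n):
--         T[i][D[i]] = 1
--         # implements the base cases
--
--         for m in range(3):
--             k = (m - D[i]) % 3
--             for j in range(i):
--                 relax(i, j, m, k)
--
--     # relax implements the following recurrence
--     # T[i][m] =  max_{j < i} {1 + T[j][k]}, where k + L[i] = m mod 3
--     # if j particularly maximises the above recurrence then paren(i, m) = (j, k)
--
--     maxloc = 0 # stores the starting location of the largest possible digit
--     for i in range(n):
--         if T[i][0] >= T[maxloc][0]: maxloc = i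
--
--     answer = 0
--     loc = (maxloc, 0)
--     # this variable would recursively call the parents one by one to construct the largest number
--
--     if T[maxloc][0] != 0:
--     # eliminating the case when no such number exists
--         while loc != (None, None):
--             answer = answer * 10 + L[loc[0]]
--             loc = pi[loc[0]][loc[1]]
--
--     return answer
-- ===== SOURCE B (Python) =====
-- def solution(L):
--     # one-pass per-residue running-max DP over the sorted list: for each residue m
--     # keep (length, value) of the best chain so far (A's tie-break = latest argmax)
--     L = sorted(L)
--     best = [(0, 0), (0, 0), (0, 0)]
--     for x in L:
--         d = x % 3
--         cand = []
--         for m in range(3):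
--             bl, bv = best[(m - d) % 3]
--             if bl > 0:
--                 cand.append((m, bl + 1, bv + x * 10 ** bl))
--             elif m == d:
--                 cand.append((m, 1, x))
--         for (m, l, v) in cand:
--             if l >= best[m][0]:
--                 best[m] = (l, v)
--     return best[0][1] if best[0][0] > 0 else 0
-- ===== Notes on version B (the rewrite author's own statement) =====
-- stated objective: faster
-- what changed: Replaces the O(n^2) table DP with parent-pointer backtracking by a single pass over the sorted list that keeps, per residue class mod 3, only the running best (chain length, chain value) pair with A's latest-argmax tie-breaking, so the quadratic relax scan, the pi table and the reconstruction walk all disappear.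
-- crash fix: On the empty list A raises IndexError (it reads T[maxloc] of an empty table); B returns 0. — e.g. on solution([]): A raises IndexError, B returns 0
import Mathlib
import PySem

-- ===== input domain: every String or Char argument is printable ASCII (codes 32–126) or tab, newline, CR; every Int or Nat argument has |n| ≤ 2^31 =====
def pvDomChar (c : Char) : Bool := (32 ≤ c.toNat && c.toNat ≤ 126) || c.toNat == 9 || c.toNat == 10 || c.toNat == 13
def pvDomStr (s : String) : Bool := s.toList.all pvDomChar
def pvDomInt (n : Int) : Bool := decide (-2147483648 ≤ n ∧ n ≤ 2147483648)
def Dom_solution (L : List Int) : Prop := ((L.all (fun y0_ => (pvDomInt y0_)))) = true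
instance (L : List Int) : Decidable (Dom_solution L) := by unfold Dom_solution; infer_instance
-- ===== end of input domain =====

-- B replaces A's quadratic table DP + parent-pointer reconstruction by one pass over the
-- sorted list keeping, per residue mod 3, the running best (chain length, chain value).

-- ===== PORT A =====
def pvRelax (TR : List (List Int)) (k : Nat) (s : Int × Option (Nat × Nat)) (j : Nat) :
    Int × Option (Nat × Nat) :=
  let tj := (TR.getD j []).getD k 0
  if tj ≠ 0 then
    if 1 + tj ≥ s.1 then (1 + tj, some (j, k)) else s
  else s

def pvRow (TR : List (List Int)) (i : Nat) (d : Int) :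
    List Int × List (Option (Nat × Nat)) :=
  (List.range 3).foldl (fun rs (m : Nat) =>
      let k : Nat := (PySem.Int.mod ((m : Int) - d) 3).toNat
      let t0 : Int := if (m : Int) = d then 1 else 0
      let tp := (List.range i).foldl (pvRelax TR k) (t0, none)
      (rs.1 ++ [tp.1], rs.2 ++ [tp.2])) ([], [])

def pvTables (D : List Int) :
    List (List Int) × List (List (Option (Nat × Nat))) :=
  D.foldl (fun st d =>
      let row := pvRow st.1 st.1.length d
      (st.1 ++ [row.1], st.2 ++ [row.2])) ([], [])

def pvWalk (Ls : List Int) (PR : List (List (Option (Nat × Nat)))) :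
    Nat → Option (Nat × Nat) → Int → Int
  | 0, _, ans => ans
  | _ + 1, none, ans => ans
  | f + 1, some jm, ans =>
      pvWalk Ls PR f ((PR.getD jm.1 []).getD jm.2 none) (ans * 10 + Ls.getD jm.1 0)

def solution (L : List Int) : Int :=
  let n := L.length
  let Ls := PySem.List.sorted L (fun x => x) false
  let D := Ls.map (fun x => PySem.Int.mod x 3)
  let TP := pvTables D
  let ml := (List.range n).foldl
      (fun ml i => if (TP.1.getD i []).getD 0 0 ≥ (TP.1.getD ml []).getD 0 0 then i else ml) 0
  if (TP.1.getD ml []).getD 0 0 ≠ 0 then pvWalk Ls TP.2 (n + 1) (some (ml, 0)) 0 else 0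

-- ===== PORT B =====
def pvBStep (best : List (Int × Int)) (x : Int) : List (Int × Int) :=
  let d := PySem.Int.mod x 3
  let cand := (List.range 3).foldl (fun (c : List (Nat × Int × Int)) (m : Nat) =>
      let bk := best.getD ((PySem.Int.mod ((m : Int) - d) 3).toNat) (0, 0)
      if bk.1 > 0 then c ++ [(m, bk.1 + 1, bk.2 + x * 10 ^ bk.1.toNat)]
      else if (m : Int) = d then c ++ [(m, 1, x)] else c)
    []
  cand.foldl (fun b mlv => if mlv.2.1 ≥ (b.getD mlv.1 (0, 0)).1 then b.set mlv.1 mlv.2 else b) best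

def solution_alt (L : List Int) : Int :=
  let Ls := PySem.List.sorted L (fun x => x) false
  let best := Ls.foldl pvBStep [(0, 0), (0, 0), (0, 0)]
  if (best.getD 0 (0, 0)).1 > 0 then (best.getD 0 (0, 0)).2 else 0

-- ===== PRECONDITION & SPEC =====
-- Pre_ excludes only the empty list, on which the Python A raises IndexError.
def Pre_solution (L : List Int) : Prop := L ≠ []
instance (L : List Int) : Decidable (Pre_solution L) := by unfold Pre_solution; infer_instance
def pvWitness_solution : List Int := ([3, 1, 4, 1, 5])

-- On the empty list A raises IndexError (it reads T[maxloc] of an empty table); B returns 0.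
def Raises_solution (L : List Int) : Prop := L = []
instance (L : List Int) : Decidable (Raises_solution L) := by unfold Raises_solution; infer_instance
def pvRaiseWitness_solution : List Int := ([])
def pvRaiseWitnessOut_solution : Int := 0

def Spec_solution (L : List Int) (out : Int) : Prop := out = solution_alt L
instance (L : List Int) (out : Int) : Decidable (Spec_solution L out) := by unfold Spec_solution; infer_instance

-- ===== CLAIM (what is proved, stated in full; the proofs are below) =====
def Claim_equal_solution : Prop := ∀ (L : List Int), Dom_solution L → Pre_solution L → Spec_solution L (solution L)
def Claim_raises_solution : Prop := (∀ (L : List Int), Dom_solution L → Raises_solution L → ¬ Pre_solution L) ∧ (Dom_solution (pvRaiseWitness_solution) ∧ Raises_solution (pvRaiseWitness_solution) ∧ solution_alt (pvRaiseWitness_solution) = pvRaiseWitnessOut_solution)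


-- ===== LEMMAS AND PROOFS =====

-- table accessors
def tA (TR : List (List Int)) (j m : Nat) : Int := (TR.getD j []).getD m 0

def pAp (PR : List (List (Option (Nat × Nat)))) (j m : Nat) : Option (Nat × Nat) :=
  (PR.getD j []).getD m none

-- parent pointers are well-formed: they point strictly down and lengths drop by one
def ChainAt (TR : List (List Int)) (PR : List (List (Option (Nat × Nat)))) (j m : Nat) : Prop :=
  match pAp PR j m with
  | none => tA TR j m ≤ 1
  | some jk => jk.1 < j ∧ jk.2 < 3 ∧ 1 ≤ tA TR jk.1 jk.2 ∧ tA TR j m = tA TR jk.1 jk.2 + 1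

def Chain (TR : List (List Int)) (PR : List (List (Option (Nat × Nat)))) (i : Nat) : Prop :=
  ∀ j m, j < i → m < 3 → ChainAt TR PR j m

-- j is the LAST index below i attaining the maximum b of f
def LastMax (f : Nat → Int) (i : Nat) (b : Int) (j : Nat) : Prop :=
  j < i ∧ f j = b ∧ (∀ t, t < i → f t ≤ b) ∧ ∀ t, j < t → t < i → f t < b

-- what B's best entry for residue m means in terms of A's tables
def ResInv (Ls : List Int) (i : Nat) (TR : List (List Int))
    (PR : List (List (Option (Nat × Nat)))) (p : Int × Int) (m : Nat) : Prop :=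
  0 ≤ p.1 ∧ (∀ j, j < i → tA TR j m ≤ p.1) ∧
  (0 < p.1 → ∃ j, LastMax (fun t => tA TR t m) i p.1 j ∧
      p.2 = pvWalk Ls PR (j + 1) (some (j, m)) 0)

def LoopInv (Ls : List Int) (i : Nat) (TR : List (List Int))
    (PR : List (List (Option (Nat × Nat)))) (best : List (Int × Int)) : Prop :=
  TR.length = i ∧ PR.length = i ∧ best.length = 3 ∧ (∀ j m, 0 ≤ tA TR j m) ∧
  Chain TR PR i ∧ ∀ m, m < 3 → ResInv Ls i TR PR (best.getD m (0, 0)) m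


theorem tA_append_lt (TR : List (List Int)) (rs : List (List Int)) (j m : Nat)
    (h : j < TR.length) : tA (TR ++ rs) j m = tA TR j m := by
  simp [tA, List.getD_eq_getElem?_getD, List.getElem?_append_left h]

theorem tA_append_self (TR : List (List Int)) (rt : List Int) (m : Nat) :
    tA (TR ++ [rt]) TR.length m = rt.getD m 0 := by
  simp [tA, List.getD_eq_getElem?_getD]

theorem pAp_append_lt (PR rs : List (List (Option (Nat × Nat)))) (j m : Nat)
    (h : j < PR.length) : pAp (PR ++ rs) j m = pAp PR j m := by
  simp [pAp, List.getD_eq_getElem?_getD, List.getElem?_append_left h]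

theorem pAp_append_self (PR : List (List (Option (Nat × Nat))))
    (rp : List (Option (Nat × Nat))) (m : Nat) :
    pAp (PR ++ [rp]) PR.length m = rp.getD m none := by
  simp [pAp, List.getD_eq_getElem?_getD]

theorem pvWalk_none (Ls : List Int) (PR : List (List (Option (Nat × Nat))))
    (f : Nat) (ans : Int) : pvWalk Ls PR f none ans = ans := by
  cases f <;> rfl

-- ---- the inner relax loop ----
theorem relaxFold_zero (TR : List (List Int)) (k : Nat) (i : Nat)
    (s0 : Int × Option (Nat × Nat)) (hz : ∀ j, j < i → tA TR j k = 0) :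
    (List.range i).foldl (pvRelax TR k) s0 = s0 := by
  induction i with
  | zero => simp
  | succ n ih =>
    rw [List.range_succ, List.foldl_append, ih (fun j hj => hz j (by omega))]
    have h0 := hz n (by omega)
    simp only [tA] at h0
    simp only [List.foldl, pvRelax, h0]
    simp

theorem relaxFold_fst_le (TR : List (List Int)) (k : Nat) (i : Nat) (t0 : Int)
    (p0 : Option (Nat × Nat)) (b : Int) (hmax : ∀ t, t < i → tA TR t k ≤ b)
    (h0 : t0 ≤ 1 + b) :
    ((List.range i).foldl (pvRelax TR k) (t0, p0)).1 ≤ 1 + b := by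
  induction i with
  | zero => simpa using h0
  | succ n ih =>
    rw [List.range_succ, List.foldl_append]
    have hb := ih (fun t ht => hmax t (by omega))
    have hn := hmax n (by omega)
    simp only [List.foldl, pvRelax, tA] at *
    split_ifs <;> simp_all

theorem relaxFold_pos (TR : List (List Int)) (k : Nat) (i : Nat) (t0 : Int)
    (p0 : Option (Nat × Nat)) (ht : t0 ≤ 1) (b : Int) (j : Nat)
    (h : LastMax (fun t => tA TR t k) i b j) (hb : 0 < b) :
    (List.range i).foldl (pvRelax TR k) (t0, p0) = (1 + b, some (j, k)) := by
  obtain ⟨hj, hfj, hmax, hlast⟩ := h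
  induction i with
  | zero => omega
  | succ n ih =>
    rw [List.range_succ, List.foldl_append]
    rcases Nat.lt_succ_iff_lt_or_eq.mp hj with hjn | rfl
    · rw [ih hjn (fun t ht => hmax t (by omega)) (fun t h1 h2 => hlast t h1 (by omega))]
      have hn : tA TR n k < b := hlast n hjn (by omega)
      simp only [tA] at hn
      simp only [List.foldl, pvRelax]
      split_ifs <;> first | rfl | (exfalso; omega)
    · have hs := relaxFold_fst_le TR k j t0 p0 b (fun t ht => hmax t (by omega)) (by omega)
      have hfj' : (TR.getD j []).getD k 0 = b := hfj
      simp only [List.foldl, pvRelax, hfj']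
      split_ifs <;> first | rfl | (exfalso; omega)

-- ---- the maxloc loop ----
theorem mlFold_aux (f : Nat → Int) (n : Nat) :
    ((List.range n).foldl (fun ml i => if f i ≥ f ml then i else ml) 0) < max n 1 ∧
    (∀ t, t < n → f t ≤ f ((List.range n).foldl (fun ml i => if f i ≥ f ml then i else ml) 0)) ∧
    (∀ t, ((List.range n).foldl (fun ml i => if f i ≥ f ml then i else ml) 0) < t → t < n →
      f t < f ((List.range n).foldl (fun ml i => if f i ≥ f ml then i else ml) 0)) := by
  induction n with
  | zero => exact ⟨by simp, by omega, by omega⟩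
  | succ n ih =>
    obtain ⟨ih1, ih2, ih3⟩ := ih
    rw [List.range_succ, List.foldl_append]
    simp only [List.foldl]
    split_ifs with hge
    · refine ⟨by omega, ?_, by omega⟩
      intro t ht
      rcases Nat.lt_succ_iff_lt_or_eq.mp ht with h | rfl
      · exact le_trans (ih2 t h) hge
      · exact le_refl _
    · refine ⟨by omega, ?_, ?_⟩
      · intro t ht
        rcases Nat.lt_succ_iff_lt_or_eq.mp ht with h | rfl
        · exact ih2 t h
        · omega
      · intro t h1 h2
        rcases Nat.lt_succ_iff_lt_or_eq.mp h2 with h | rfl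
        · exact ih3 t h1 h
        · omega

theorem mlFold_eq (f : Nat → Int) (n : Nat) (b : Int) (j : Nat) (h : LastMax f n b j) :
    (List.range n).foldl (fun ml i => if f i ≥ f ml then i else ml) 0 = j := by
  obtain ⟨hj, hfj, hmax, hlast⟩ := h
  obtain ⟨a1, a2, a3⟩ := mlFold_aux f n
  set r := (List.range n).foldl (fun ml i => if f i ≥ f ml then i else ml) 0 with hr
  have hrn : r < n := by omega
  rcases lt_trichotomy j r with h | h | h
  · have h1 := hlast r h hrn
    have h2 := a2 j hj
    omega
  · exact h.symm
  · have h1 := a3 j h hj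
    have h2 := hmax r hrn
    omega

-- ---- walk lemmas ----
theorem pvWalk_grow (Ls : List Int) (TR : List (List Int))
    (PR : List (List (Option (Nat × Nat)))) (rs : List (List (Option (Nat × Nat))))
    (hc : Chain TR PR PR.length) :
    ∀ f j m ans, j < PR.length → m < 3 →
      pvWalk Ls (PR ++ rs) f (some (j, m)) ans = pvWalk Ls PR f (some (j, m)) ans := by
  intro f
  induction f with
  | zero => intro j m ans hj hm; rfl
  | succ f ih =>
    intro j m ans hj hm
    have hgd : ((PR ++ rs).getD j []) = PR.getD j [] := List.getD_append _ _ _ _ hj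
    simp only [pvWalk, hgd]
    have hca := hc j m hj hm
    unfold ChainAt at hca
    cases hnext : pAp PR j m with
    | none =>
      simp only [pAp] at hnext
      rw [hnext, pvWalk_none, pvWalk_none]
    | some jk =>
      rw [hnext] at hca
      simp only [pAp] at hnext
      rw [hnext]
      exact ih jk.1 jk.2 _ (lt_trans hca.1 hj) hca.2.1

theorem pvWalk_fuel (Ls : List Int) (TR : List (List Int))
    (PR : List (List (Option (Nat × Nat)))) (hc : Chain TR PR PR.length) :
    ∀ j, j < PR.length → ∀ m, m < 3 → ∀ f f' ans, j + 1 ≤ f → j + 1 ≤ f' →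
      pvWalk Ls PR f (some (j, m)) ans = pvWalk Ls PR f' (some (j, m)) ans := by
  intro j
  induction j using Nat.strong_induction_on with
  | _ j ihj =>
    intro hj m hm f f' ans hf hf'
    match f, f' with
    | fa + 1, fb + 1 =>
      simp only [pvWalk]
      have hca := hc j m hj hm
      unfold ChainAt at hca
      cases hnext : pAp PR j m with
      | none =>
        simp only [pAp] at hnext
        rw [hnext, pvWalk_none, pvWalk_none]
      | some jk =>
        rw [hnext] at hca
        simp only [pAp] at hnext
        rw [hnext]
        exact ihj jk.1 hca.1 (lt_trans hca.1 hj) jk.2 hca.2.1 fa fb _ (by omega) (by omega)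

theorem pvWalk_acc (Ls : List Int) (TR : List (List Int))
    (PR : List (List (Option (Nat × Nat)))) (hc : Chain TR PR PR.length) :
    ∀ j, j < PR.length → ∀ m, m < 3 → ∀ f ans, j + 1 ≤ f → 1 ≤ tA TR j m →
      pvWalk Ls PR f (some (j, m)) ans =
        ans * 10 ^ (tA TR j m).toNat + pvWalk Ls PR f (some (j, m)) 0 := by
  intro j
  induction j using Nat.strong_induction_on with
  | _ j ihj =>
    intro hj m hm f ans hf ht
    match f with
    | fa + 1 =>
      simp only [pvWalk]
      have hca := hc j m hj hm
      unfold ChainAt at hca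
      cases hnext : pAp PR j m with
      | none =>
        rw [hnext] at hca
        have ht1 : tA TR j m = 1 := le_antisymm hca ht
        simp only [pAp] at hnext
        rw [hnext, pvWalk_none, pvWalk_none, ht1]
        norm_num
      | some jk =>
        rw [hnext] at hca
        obtain ⟨hlt, hk3, h1, heq⟩ := hca
        simp only [pAp] at hnext
        rw [hnext]
        have ihA := ihj jk.1 hlt (lt_trans hlt hj) jk.2 hk3 fa (ans * 10 + Ls.getD j 0)
          (by omega) h1
        have ihB := ihj jk.1 hlt (lt_trans hlt hj) jk.2 hk3 fa (0 * 10 + Ls.getD j 0)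
          (by omega) h1
        rw [ihA, ihB, heq]
        have h2 : (tA TR jk.1 jk.2 + 1).toNat = (tA TR jk.1 jk.2).toNat + 1 := by omega
        rw [h2, pow_succ]
        ring

-- ---- shape of one A row / one B step ----
theorem pvRow_getD (TR : List (List Int)) (i : Nat) (d : Int) (m : Nat) (hm : m < 3) :
    (pvRow TR i d).1.getD m 0 =
      ((List.range i).foldl (pvRelax TR ((PySem.Int.mod ((m : Int) - d) 3).toNat))
        (if (m : Int) = d then 1 else 0, none)).1 ∧
    (pvRow TR i d).2.getD m none =
      ((List.range i).foldl (pvRelax TR ((PySem.Int.mod ((m : Int) - d) 3).toNat))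
        (if (m : Int) = d then 1 else 0, none)).2 := by
  interval_cases m <;>
    simp [pvRow, show List.range 3 = [0,1,2] from rfl, List.getD]

theorem pvRow_len (TR : List (List Int)) (i : Nat) (d : Int) :
    (pvRow TR i d).1.length = 3 ∧ (pvRow TR i d).2.length = 3 := by
  constructor <;> rfl

def updB (b : List (Int × Int)) (mlv : Nat × Int × Int) : List (Int × Int) :=
  if mlv.2.1 ≥ (b.getD mlv.1 (0, 0)).1 then b.set mlv.1 mlv.2 else b

def candE (best : List (Int × Int)) (x : Int) (m : Nat) : List (Nat × Int × Int) :=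
  let d := PySem.Int.mod x 3
  let bk := best.getD ((PySem.Int.mod ((m : Int) - d) 3).toNat) (0, 0)
  if bk.1 > 0 then [(m, bk.1 + 1, bk.2 + x * 10 ^ bk.1.toNat)]
  else if (m : Int) = d then [(m, 1, x)] else []

theorem candE_fst (best : List (Int × Int)) (x : Int) (m : Nat) :
    ∀ p ∈ candE best x m, p.1 = m := by
  unfold candE
  dsimp only
  split_ifs <;> simp

theorem updB_len (e : List (Nat × Int × Int)) :
    ∀ b : List (Int × Int), (e.foldl updB b).length = b.length := by
  induction e with
  | nil => intro b; rfl
  | cons c cs ih =>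
    intro b
    simp only [List.foldl, updB]
    split_ifs
    · rw [ih, List.length_set]
    · exact ih b

theorem updB_notouch (e : List (Nat × Int × Int)) (m : Nat) (he : ∀ p ∈ e, p.1 ≠ m) :
    ∀ b : List (Int × Int), (e.foldl updB b).getD m (0, 0) = b.getD m (0, 0) := by
  induction e with
  | nil => intro b; rfl
  | cons c cs ih =>
    intro b
    simp only [List.foldl, updB]
    have hc : c.1 ≠ m := he c (by simp)
    split_ifs
    · rw [ih (fun p hp => he p (by simp [hp]))]
      simp [List.getD_eq_getElem?_getD, List.getElem?_set_ne hc]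
    · exact ih (fun p hp => he p (by simp [hp])) b

theorem updB_single (m : Nat) (l v : Int) (b : List (Int × Int)) (hm : m < b.length) :
    (List.foldl updB b [(m, l, v)]).getD m (0, 0) =
      if l ≥ (b.getD m (0, 0)).1 then (l, v) else b.getD m (0, 0) := by
  simp only [List.foldl, updB]
  split_ifs
  · simp [List.getD_eq_getElem?_getD, List.getElem?_set_self hm]
  · rfl

theorem cand_split (best : List (Int × Int)) (x : Int) :
    pvBStep best x =
      (candE best x 0 ++ candE best x 1 ++ candE best x 2).foldl updB best := by
  unfold pvBStep candE updB
  simp only [show List.range 3 = [0, 1, 2] from rfl, List.foldl]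
  split_ifs <;> simp


theorem getD_foldl_candE (b' best : List (Int × Int)) (x : Int) (m : Nat)
    (hlen' : b'.length = 3) (hm : m < 3)
    (hagree : b'.getD m (0, 0) = best.getD m (0, 0)) :
    ((candE best x m).foldl updB b').getD m (0, 0) =
      (let d := PySem.Int.mod x 3
       let bk := best.getD ((PySem.Int.mod ((m : Int) - d) 3).toNat) (0, 0)
       let bm := best.getD m (0, 0)
       if bk.1 > 0 then
         if bk.1 + 1 ≥ bm.1 then (bk.1 + 1, bk.2 + x * 10 ^ bk.1.toNat) else bm
       else if (m : Int) = d then (if (1 : Int) ≥ bm.1 then (1, x) else bm) else bm) := by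
  unfold candE
  dsimp only
  by_cases h1 :
      (best.getD ((PySem.Int.mod ((m : Int) - PySem.Int.mod x 3) 3).toNat) (0, 0)).1 > 0
  · rw [if_pos h1, if_pos h1, updB_single m _ _ b' (by omega), hagree]
  · rw [if_neg h1, if_neg h1]
    by_cases h2 : (m : Int) = PySem.Int.mod x 3
    · rw [if_pos h2, if_pos h2, updB_single m _ _ b' (by omega), hagree]
    · rw [if_neg h2, if_neg h2]
      exact hagree

theorem pvBStep_getD (best : List (Int × Int)) (x : Int) (m : Nat) (hm : m < 3)
    (hlen : best.length = 3) :
    (pvBStep best x).getD m (0, 0) =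
      (let d := PySem.Int.mod x 3
       let bk := best.getD ((PySem.Int.mod ((m : Int) - d) 3).toNat) (0, 0)
       let bm := best.getD m (0, 0)
       if bk.1 > 0 then
         if bk.1 + 1 ≥ bm.1 then (bk.1 + 1, bk.2 + x * 10 ^ bk.1.toNat) else bm
       else if (m : Int) = d then (if (1 : Int) ≥ bm.1 then (1, x) else bm) else bm) := by
  rw [cand_split, List.foldl_append, List.foldl_append]
  interval_cases m
  · rw [updB_notouch (candE best x 2) 0 (fun p hp => by rw [candE_fst best x 2 p hp]; omega),
      updB_notouch (candE best x 1) 0 (fun p hp => by rw [candE_fst best x 1 p hp]; omega)]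
    exact getD_foldl_candE best best x 0 hlen (by omega) rfl
  · rw [updB_notouch (candE best x 2) 1 (fun p hp => by rw [candE_fst best x 2 p hp]; omega)]
    exact getD_foldl_candE _ best x 1 (by rw [updB_len]; exact hlen) (by omega)
      (updB_notouch (candE best x 0) 1
        (fun p hp => by rw [candE_fst best x 0 p hp]; omega) best)
  · refine getD_foldl_candE _ best x 2 (by rw [updB_len, updB_len]; exact hlen) (by omega) ?_
    rw [updB_notouch (candE best x 1) 2
        (fun p hp => by rw [candE_fst best x 1 p hp]; omega),
      updB_notouch (candE best x 0) 2
        (fun p hp => by rw [candE_fst best x 0 p hp]; omega)]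

theorem foldl_set_len (cand : List (Nat × Int × Int)) :
    ∀ b : List (Int × Int),
      (cand.foldl (fun b mlv =>
        if mlv.2.1 ≥ (b.getD mlv.1 (0, 0)).1 then b.set mlv.1 mlv.2 else b) b).length =
        b.length := by
  induction cand with
  | nil => intro b; rfl
  | cons c cs ih =>
    intro b
    simp only [List.foldl]
    split_ifs
    · rw [ih, List.length_set]
    · exact ih b

theorem pvBStep_len (best : List (Int × Int)) (x : Int) (h : best.length = 3) :
    (pvBStep best x).length = 3 := by
  unfold pvBStep
  rw [foldl_set_len]
  exact h

-- ---- one residue of the invariant through one step ----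
theorem res_step (Ls : List Int) (i : Nat) (TR : List (List Int))
    (PR : List (List (Option (Nat × Nat)))) (rt : List Int)
    (rp : List (Option (Nat × Nat))) (hTR : TR.length = i) (hPR : PR.length = i)
    (hch : Chain TR PR i) (m : Nat) (hm : m < 3) (bl bv Tnew Vnew : Int)
    (hres : ResInv Ls i TR PR (bl, bv) m)
    (hT : tA (TR ++ [rt]) i m = Tnew) (hTnn : 0 ≤ Tnew)
    (hV : 0 < Tnew → Vnew = pvWalk Ls (PR ++ [rp]) (i + 1) (some (i, m)) 0) :
    ResInv Ls (i + 1) (TR ++ [rt]) (PR ++ [rp])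
      (if Tnew ≥ bl ∧ 0 < Tnew then (Tnew, Vnew) else (bl, bv)) m := by
  obtain ⟨hnn0, hbd, hwit⟩ := hres
  have hlt : ∀ j, j < i → tA (TR ++ [rt]) j m = tA TR j m := fun j hj =>
    tA_append_lt TR [rt] j m (by omega)
  have hTle : ∀ t, t < i + 1 → ¬(Tnew ≥ bl ∧ 0 < Tnew) → tA (TR ++ [rt]) t m ≤ bl := by
    intro t ht hcond
    rcases Nat.lt_succ_iff_lt_or_eq.mp ht with h | rfl
    · rw [hlt t h]; exact hbd t h
    · rw [hT]; rcases not_and_or.mp hcond with h | h <;> omega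
  split_ifs with hcond
  · obtain ⟨hge, hpos⟩ := hcond
    have hub : ∀ t, t < i + 1 → tA (TR ++ [rt]) t m ≤ Tnew := by
      intro t ht
      rcases Nat.lt_succ_iff_lt_or_eq.mp ht with h | rfl
      · rw [hlt t h]; exact le_trans (hbd t h) hge
      · rw [hT]
    refine ⟨by omega, hub, ?_⟩
    intro _
    exact ⟨i, ⟨by omega, hT, hub, by intro t h1 h2; omega⟩, hV hpos⟩
  · refine ⟨hnn0, fun j hj => hTle j hj hcond, ?_⟩
    intro hbl
    obtain ⟨j, ⟨hj, hfj, hmax, hlast⟩, hval⟩ := hwit hbl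
    refine ⟨j, ⟨by omega, by dsimp only; rw [hlt j hj]; exact hfj, ?_, ?_⟩, ?_⟩
    · intro t ht
      exact hTle t ht hcond
    · intro t h1 h2
      rcases Nat.lt_succ_iff_lt_or_eq.mp h2 with h | rfl
      · dsimp only; rw [hlt t h]; exact hlast t h1 h
      · dsimp only; rw [hT]
        rcases not_and_or.mp hcond with h | h <;> omega
    · rw [hval]
      exact (pvWalk_grow Ls TR PR [rp] (by rw [hPR]; exact hch) (j + 1) j m 0
        (by omega) hm).symm

-- value of the freshly appended chain node
theorem newval_walk (Ls : List Int) (i : Nat) (TR : List (List Int))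
    (PR : List (List (Option (Nat × Nat)))) (rt : List Int)
    (rp : List (Option (Nat × Nat))) (hTR : TR.length = i) (hPR : PR.length = i)
    (hch : Chain TR PR i) (hch' : Chain (TR ++ [rt]) (PR ++ [rp]) (i + 1))
    (hnn' : ∀ j m, 0 ≤ tA (TR ++ [rt]) j m) (m k jw : Nat) (hm : m < 3) (hk : k < 3)
    (hjw : jw < i) (bl bv x : Int) (hbl : 0 < bl) (hx : Ls.getD i 0 = x)
    (hTjw : tA (TR ++ [rt]) jw k = bl)
    (hp : pAp (PR ++ [rp]) i m = some (jw, k))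
    (hbv : bv = pvWalk Ls PR (jw + 1) (some (jw, k)) 0) :
    pvWalk Ls (PR ++ [rp]) (i + 1) (some (i, m)) 0 = bv + x * 10 ^ bl.toNat := by
  have hlenPR' : (PR ++ [rp]).length = i + 1 := by simp [hPR]
  have hch'' : Chain (TR ++ [rt]) (PR ++ [rp]) ((PR ++ [rp]).length) := by
    rw [hlenPR']; exact hch'
  have hstep : pvWalk Ls (PR ++ [rp]) (i + 1) (some (i, m)) 0 =
      pvWalk Ls (PR ++ [rp]) i (some (jw, k)) x := by
    show pvWalk Ls (PR ++ [rp]) i (((PR ++ [rp]).getD i []).getD m none) (0 * 10 + Ls.getD i 0) =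
      _
    have : ((PR ++ [rp]).getD i []).getD m none = some (jw, k) := hp
    rw [this, hx]
    norm_num
  rw [hstep]
  have hacc := pvWalk_acc Ls (TR ++ [rt]) (PR ++ [rp]) hch'' jw (by omega) k hk i x
    (by omega) (by omega)
  rw [hacc, hTjw]
  have hgrow := pvWalk_grow Ls TR PR [rp] (by rw [hPR]; exact hch) i jw k 0 (by omega) hk
  rw [hgrow]
  have hfuel := pvWalk_fuel Ls TR PR (by rw [hPR]; exact hch) jw (by omega) k hk i (jw + 1) 0
    (by omega) (by omega)
  rw [hfuel, ← hbv]
  ring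

-- ---- the full step ----
theorem step_inv (Ls : List Int) (i : Nat) (TR : List (List Int))
    (PR : List (List (Option (Nat × Nat)))) (best : List (Int × Int)) (x : Int)
    (hInv : LoopInv Ls i TR PR best) (hxi : Ls.getD i 0 = x) :
    LoopInv Ls (i + 1) (TR ++ [(pvRow TR TR.length (PySem.Int.mod x 3)).1])
      (PR ++ [(pvRow TR TR.length (PySem.Int.mod x 3)).2]) (pvBStep best x) := by
  obtain ⟨hTR, hPR, hblen, hnn, hch, hres⟩ := hInv
  subst hTR
  set d := PySem.Int.mod x 3 with hd
  set rt := (pvRow TR TR.length d).1 with hrt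
  set rp := (pvRow TR TR.length d).2 with hrp
  have hk3 : ∀ m : Nat, (PySem.Int.mod ((m : Int) - d) 3).toNat < 3 := by
    intro m
    have h1 : 0 ≤ PySem.Int.mod ((m : Int) - d) 3 := PySem.Int.mod_nonneg _ (by norm_num)
    have h2 : PySem.Int.mod ((m : Int) - d) 3 < 3 := PySem.Int.mod_lt _ (by norm_num)
    omega
  have hrowm : ∀ m : Nat, m < 3 →
      tA (TR ++ [rt]) TR.length m =
        ((List.range TR.length).foldl (pvRelax TR ((PySem.Int.mod ((m : Int) - d) 3).toNat))
          (if (m : Int) = d then 1 else 0, none)).1 ∧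
      pAp (PR ++ [rp]) TR.length m =
        ((List.range TR.length).foldl (pvRelax TR ((PySem.Int.mod ((m : Int) - d) 3).toNat))
          (if (m : Int) = d then 1 else 0, none)).2 := by
    intro m hm
    constructor
    · rw [tA_append_self, hrt, (pvRow_getD TR TR.length d m hm).1]
    · rw [show pAp (PR ++ [rp]) TR.length m = rp.getD m none from by
        rw [← hPR]; exact pAp_append_self PR rp m, hrp, (pvRow_getD TR TR.length d m hm).2]
  have hfold : ∀ m : Nat, m < 3 →
      (((best.getD ((PySem.Int.mod ((m : Int) - d) 3).toNat) (0, 0)).1 = 0 ∧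
        ((List.range TR.length).foldl (pvRelax TR ((PySem.Int.mod ((m : Int) - d) 3).toNat))
          (if (m : Int) = d then 1 else 0, none)) = (if (m : Int) = d then 1 else 0, none)) ∨
       (0 < (best.getD ((PySem.Int.mod ((m : Int) - d) 3).toNat) (0, 0)).1 ∧
        ∃ jw, LastMax (fun t => tA TR t ((PySem.Int.mod ((m : Int) - d) 3).toNat)) TR.length
            ((best.getD ((PySem.Int.mod ((m : Int) - d) 3).toNat) (0, 0)).1) jw ∧
          (best.getD ((PySem.Int.mod ((m : Int) - d) 3).toNat) (0, 0)).2 =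
            pvWalk Ls PR (jw + 1) (some (jw, (PySem.Int.mod ((m : Int) - d) 3).toNat)) 0 ∧
          ((List.range TR.length).foldl (pvRelax TR ((PySem.Int.mod ((m : Int) - d) 3).toNat))
            (if (m : Int) = d then 1 else 0, none)) =
            (1 + (best.getD ((PySem.Int.mod ((m : Int) - d) 3).toNat) (0, 0)).1,
              some (jw, (PySem.Int.mod ((m : Int) - d) 3).toNat)))) := by
    intro m hm
    obtain ⟨hp0, hpb, hpw⟩ := hres ((PySem.Int.mod ((m : Int) - d) 3).toNat) (hk3 m)
    have ht0 : (if (m : Int) = d then (1 : Int) else 0) ≤ 1 := by split_ifs <;> omega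
    rcases eq_or_lt_of_le hp0 with hz | hpos
    · left
      refine ⟨hz.symm, relaxFold_zero TR _ TR.length _ ?_⟩
      intro j hj
      have h1 := hpb j hj
      have h2 := hnn j ((PySem.Int.mod ((m : Int) - d) 3).toNat)
      omega
    · right
      obtain ⟨jw, hlm, hval⟩ := hpw hpos
      exact ⟨hpos, jw, hlm, hval, relaxFold_pos TR _ TR.length _ none ht0 _ jw hlm hpos⟩
  have hnn' : ∀ j m, 0 ≤ tA (TR ++ [rt]) j m := by
    intro j m
    rcases lt_trichotomy j TR.length with h | rfl | h
    · rw [tA_append_lt TR [rt] j m h]; exact hnn j m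
    · by_cases hm : m < 3
      · rw [(hrowm m hm).1]
        rcases hfold m hm with ⟨_, hf⟩ | ⟨hpos, jw, _, _, hf⟩ <;> rw [hf]
        · split_ifs <;> norm_num
        · dsimp only
          have := (hres _ (hk3 m)).1
          omega
      · have hlen3 : rt.length = 3 := by rw [hrt]; exact (pvRow_len TR TR.length d).1
        rw [tA_append_self, List.getD_eq_default _ _ (by omega)]
    · have hj : (TR ++ [rt]).length ≤ j := by simp; omega
      show (0 : Int) ≤ ((TR ++ [rt]).getD j []).getD m 0
      rw [List.getD_eq_default _ _ hj]
      simp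
  have hch' : Chain (TR ++ [rt]) (PR ++ [rp]) (TR.length + 1) := by
    intro j m hj hm
    rcases Nat.lt_succ_iff_lt_or_eq.mp hj with h | rfl
    · have hca := hch j m h hm
      unfold ChainAt at hca ⊢
      rw [pAp_append_lt PR [rp] j m (by omega), tA_append_lt TR [rt] j m h]
      cases hp : pAp PR j m with
      | none => rw [hp] at hca; exact hca
      | some jk =>
        rw [hp] at hca
        dsimp only at hca ⊢
        rw [tA_append_lt TR [rt] jk.1 jk.2 (by omega)]
        exact hca
    · unfold ChainAt
      rw [(hrowm m hm).2]
      rcases hfold m hm with ⟨hz, hf⟩ | ⟨hpos, jw, hlm, hval, hf⟩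
      · rw [hf]
        dsimp only
        rw [(hrowm m hm).1, hf]
        split_ifs <;> omega
      · rw [hf]
        dsimp only
        obtain ⟨hjw, hfjw, _, _⟩ := hlm
        dsimp only at hfjw
        refine ⟨hjw, hk3 m, ?_, ?_⟩
        · rw [tA_append_lt TR [rt] jw _ hjw, hfjw]
          omega
        · rw [(hrowm m hm).1, hf, tA_append_lt TR [rt] jw _ hjw, hfjw]
          dsimp only
          ring
  have hres' : ∀ m, m < 3 →
      ResInv Ls (TR.length + 1) (TR ++ [rt]) (PR ++ [rp])
        ((pvBStep best x).getD m (0, 0)) m := by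
    intro m hm
    rw [pvBStep_getD best x m hm hblen]
    dsimp only
    have hresm : ResInv Ls TR.length TR PR
        ((best.getD m (0, 0)).1, (best.getD m (0, 0)).2) m := hres m hm
    rcases hfold m hm with ⟨hz, hf⟩ | ⟨hpos, jw, hlm, hval, hf⟩
    · rw [if_neg (by omega :
        ¬ (best.getD ((PySem.Int.mod ((m : Int) - d) 3).toNat) (0, 0)).1 > 0)]
      by_cases hmd : (m : Int) = d
      · rw [if_pos hmd]
        have hT : tA (TR ++ [rt]) TR.length m = 1 := by
          rw [(hrowm m hm).1, hf]; simp [hmd]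
        have hpn : pAp (PR ++ [rp]) TR.length m = none := by
          rw [(hrowm m hm).2, hf]
        have hV : (0 : Int) < 1 → (x : Int) =
            pvWalk Ls (PR ++ [rp]) (TR.length + 1) (some (TR.length, m)) 0 := by
          intro _
          show x = pvWalk Ls (PR ++ [rp]) TR.length
            (((PR ++ [rp]).getD TR.length []).getD m none) (0 * 10 + Ls.getD TR.length 0)
          rw [show (((PR ++ [rp]).getD TR.length []).getD m none) =
              pAp (PR ++ [rp]) TR.length m from rfl, hpn, pvWalk_none, hxi]
          ring
        have hstep := res_step Ls TR.length TR PR rt rp rfl hPR hch m hm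
          (best.getD m (0, 0)).1 (best.getD m (0, 0)).2 1 x hresm hT (by norm_num)
          (fun h => hV h)
        have hcomb : (if (1 : Int) ≥ (best.getD m (0, 0)).1 then ((1 : Int), x)
              else best.getD m (0, 0)) =
            (if ((1 : Int) ≥ (best.getD m (0, 0)).1 ∧ (0 : Int) < 1) then ((1 : Int), x)
              else ((best.getD m (0, 0)).1, (best.getD m (0, 0)).2)) := by
          split_ifs with h1 h2 <;> first | rfl | (exfalso; omega)
        rw [hcomb]
        exact hstep
      · rw [if_neg hmd]
        have hT : tA (TR ++ [rt]) TR.length m = 0 := by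
          rw [(hrowm m hm).1, hf]; simp [hmd]
        have hstep := res_step Ls TR.length TR PR rt rp rfl hPR hch m hm
          (best.getD m (0, 0)).1 (best.getD m (0, 0)).2 0 0 hresm hT (by norm_num)
          (fun h => absurd h (by norm_num))
        rw [if_neg (by rintro ⟨_, h⟩; exact absurd h (by norm_num))] at hstep
        exact hstep
    · rw [if_pos hpos]
      have hT : tA (TR ++ [rt]) TR.length m =
          1 + (best.getD ((PySem.Int.mod ((m : Int) - d) 3).toNat) (0, 0)).1 := by
        rw [(hrowm m hm).1, hf]
      have hp : pAp (PR ++ [rp]) TR.length m =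
          some (jw, (PySem.Int.mod ((m : Int) - d) 3).toNat) := by
        rw [(hrowm m hm).2, hf]
      have hjwlt : jw < TR.length := hlm.1
      have hfjw := hlm.2.1
      dsimp only at hfjw
      have hTjw : tA (TR ++ [rt]) jw ((PySem.Int.mod ((m : Int) - d) 3).toNat) =
          (best.getD ((PySem.Int.mod ((m : Int) - d) 3).toNat) (0, 0)).1 := by
        rw [tA_append_lt TR [rt] jw _ hjwlt, hfjw]
      have hWalk := newval_walk Ls TR.length TR PR rt rp rfl hPR hch hch' hnn' m
        ((PySem.Int.mod ((m : Int) - d) 3).toNat) jw hm (hk3 m) hjwlt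
        (best.getD ((PySem.Int.mod ((m : Int) - d) 3).toNat) (0, 0)).1
        (best.getD ((PySem.Int.mod ((m : Int) - d) 3).toNat) (0, 0)).2 x hpos hxi hTjw hp hval
      have hstep := res_step Ls TR.length TR PR rt rp rfl hPR hch m hm
        (best.getD m (0, 0)).1 (best.getD m (0, 0)).2
        (1 + (best.getD ((PySem.Int.mod ((m : Int) - d) 3).toNat) (0, 0)).1)
        ((best.getD ((PySem.Int.mod ((m : Int) - d) 3).toNat) (0, 0)).2 +
          x * 10 ^ (best.getD ((PySem.Int.mod ((m : Int) - d) 3).toNat) (0, 0)).1.toNat)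
        hresm hT (by omega) (fun _ => hWalk.symm)
      have hadd : (best.getD ((PySem.Int.mod ((m : Int) - d) 3).toNat) (0, 0)).1 + 1 =
          1 + (best.getD ((PySem.Int.mod ((m : Int) - d) 3).toNat) (0, 0)).1 := by ring
      rw [hadd]
      have hcomb : (if 1 + (best.getD ((PySem.Int.mod ((m : Int) - d) 3).toNat) (0, 0)).1 ≥
              (best.getD m (0, 0)).1 then
            (1 + (best.getD ((PySem.Int.mod ((m : Int) - d) 3).toNat) (0, 0)).1,
              (best.getD ((PySem.Int.mod ((m : Int) - d) 3).toNat) (0, 0)).2 +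
                x * 10 ^ (best.getD ((PySem.Int.mod ((m : Int) - d) 3).toNat) (0, 0)).1.toNat)
            else best.getD m (0, 0)) =
          (if (1 + (best.getD ((PySem.Int.mod ((m : Int) - d) 3).toNat) (0, 0)).1 ≥
              (best.getD m (0, 0)).1 ∧
              (0 : Int) < 1 + (best.getD ((PySem.Int.mod ((m : Int) - d) 3).toNat) (0, 0)).1) then
            (1 + (best.getD ((PySem.Int.mod ((m : Int) - d) 3).toNat) (0, 0)).1,
              (best.getD ((PySem.Int.mod ((m : Int) - d) 3).toNat) (0, 0)).2 +
                x * 10 ^ (best.getD ((PySem.Int.mod ((m : Int) - d) 3).toNat) (0, 0)).1.toNat)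
            else ((best.getD m (0, 0)).1, (best.getD m (0, 0)).2)) := by
        split_ifs with h1 h2 <;> first | rfl | (exfalso; omega)
      rw [hcomb]
      exact hstep
  exact ⟨by simp, by simp [hPR], pvBStep_len best x hblen, hnn', hch', hres'⟩

theorem fold_inv (Ls : List Int) :
    ∀ (suf pre : List Int) (TR : List (List Int))
      (PR : List (List (Option (Nat × Nat)))) (best : List (Int × Int)),
      Ls = pre ++ suf → LoopInv Ls pre.length TR PR best →
      LoopInv Ls Ls.length
        ((suf.map (fun x => PySem.Int.mod x 3)).foldl
          (fun st d => (st.1 ++ [(pvRow st.1 st.1.length d).1], st.2 ++ [(pvRow st.1 st.1.length d).2])) (TR, PR)).1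
        ((suf.map (fun x => PySem.Int.mod x 3)).foldl
          (fun st d => (st.1 ++ [(pvRow st.1 st.1.length d).1], st.2 ++ [(pvRow st.1 st.1.length d).2])) (TR, PR)).2
        (suf.foldl pvBStep best) := by
  intro suf
  induction suf with
  | nil =>
    intro pre TR PR best hls hInv
    simp only [List.map_nil, List.foldl_nil]
    rw [List.append_nil] at hls
    subst hls
    exact hInv
  | cons y suf ih =>
    intro pre TR PR best hls hInv
    simp only [List.map_cons, List.foldl_cons]
    have hxi : Ls.getD pre.length 0 = y := by
      rw [hls]
      simp [List.getD_eq_getElem?_getD, List.getElem?_append_right (le_refl pre.length)]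
    have hstep := step_inv Ls pre.length TR PR best y hInv hxi
    have hlen : (pre ++ [y]).length = pre.length + 1 := by simp
    exact ih (pre ++ [y]) _ _ _ (by rw [hls]; simp) (by rw [hlen]; exact hstep)

theorem main_equiv (L : List Int) : solution L = solution_alt L := by
  unfold solution solution_alt
  dsimp only
  set Ls := PySem.List.sorted L (fun x => x) false with hLs
  have hlen : Ls.length = L.length := PySem.List.length_sorted L _ _
  have h0 : LoopInv Ls 0 [] [] [(0, 0), (0, 0), (0, 0)] := by
    refine ⟨rfl, rfl, rfl, ?_, ?_, ?_⟩
    · intro j m; simp [tA]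
    · intro j m hj hm; exact absurd hj (by omega)
    · intro m hm
      have hg : [((0 : Int), (0 : Int)), (0, 0), (0, 0)].getD m (0, 0) = (0, 0) := by
        interval_cases m <;> rfl
      rw [hg]
      exact ⟨le_refl 0, fun j hj => absurd hj (by omega), fun h => absurd h (by norm_num)⟩
  have hfin : LoopInv Ls Ls.length
      (pvTables (Ls.map (fun x => PySem.Int.mod x 3))).1
      (pvTables (Ls.map (fun x => PySem.Int.mod x 3))).2
      (Ls.foldl pvBStep [(0, 0), (0, 0), (0, 0)]) :=
    fold_inv Ls Ls [] [] [] [(0, 0), (0, 0), (0, 0)] (by simp) h0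
  obtain ⟨h1, h2, h3, hnnf, hchf, hresf⟩ := hfin
  obtain ⟨hb0, hbd, hbw⟩ := hresf 0 (by norm_num)
  by_cases hpos :
      0 < ((Ls.foldl pvBStep [(0, 0), (0, 0), (0, 0)]).getD 0 (0, 0)).1
  · obtain ⟨jw, hlm, hval⟩ := hbw hpos
    have hjwn : jw < Ls.length := hlm.1
    have hfjw := hlm.2.1
    dsimp only at hfjw
    have hml : (List.range L.length).foldl
        (fun ml i => if tA (pvTables (Ls.map (fun x => PySem.Int.mod x 3))).1 i 0 ≥
          tA (pvTables (Ls.map (fun x => PySem.Int.mod x 3))).1 ml 0 then i else ml) 0 = jw := by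
      apply mlFold_eq _ _ ((Ls.foldl pvBStep [(0, 0), (0, 0), (0, 0)]).getD 0 (0, 0)).1
      rw [← hlen]
      exact hlm
    rw [show ((List.range L.length).foldl
        (fun ml i => if ((pvTables (Ls.map (fun x => PySem.Int.mod x 3))).1.getD i []).getD 0 0 ≥
          ((pvTables (Ls.map (fun x => PySem.Int.mod x 3))).1.getD ml []).getD 0 0
          then i else ml) 0) = jw from hml]
    rw [if_pos (show (((pvTables (Ls.map (fun x => PySem.Int.mod x 3))).1.getD jw []).getD 0 0) ≠ 0 by
      show tA (pvTables (Ls.map (fun x => PySem.Int.mod x 3))).1 jw 0 ≠ 0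
      rw [hfjw]; omega)]
    rw [if_pos hpos]
    have hchf' : Chain (pvTables (Ls.map (fun x => PySem.Int.mod x 3))).1
        (pvTables (Ls.map (fun x => PySem.Int.mod x 3))).2
        (pvTables (Ls.map (fun x => PySem.Int.mod x 3))).2.length := by
      rw [h2]; exact hchf
    have hfuel := pvWalk_fuel Ls _ _ hchf' jw (by omega) 0 (by norm_num)
      (L.length + 1) (jw + 1) 0 (by omega) (by omega)
    rw [show pvWalk Ls (pvTables (Ls.map (fun x => PySem.Int.mod x 3))).2 (L.length + 1)
        (some (jw, 0)) 0 = pvWalk Ls (pvTables (Ls.map (fun x => PySem.Int.mod x 3))).2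
        (jw + 1) (some (jw, 0)) 0 from hfuel]
    exact hval.symm
  · rw [if_neg hpos]
    have hbl0 : ((Ls.foldl pvBStep [(0, 0), (0, 0), (0, 0)]).getD 0 (0, 0)).1 = 0 := by omega
    have hmla := mlFold_aux
      (fun t => ((pvTables (Ls.map (fun x => PySem.Int.mod x 3))).1.getD t []).getD 0 0)
      L.length
    set ml := (List.range L.length).foldl
      (fun ml i => if ((pvTables (Ls.map (fun x => PySem.Int.mod x 3))).1.getD i []).getD 0 0 ≥
        ((pvTables (Ls.map (fun x => PySem.Int.mod x 3))).1.getD ml []).getD 0 0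
        then i else ml) 0 with hmldef
    rw [if_neg]
    simp only [ne_eq, not_not]
    rcases Nat.eq_zero_or_pos L.length with hn | hn
    · rw [show (pvTables (Ls.map (fun x => PySem.Int.mod x 3))).1.getD ml [] = ([] : List Int)
        from List.getD_eq_default _ _ (by omega)]
      rfl
    · have hml_lt := hmla.1
      have hle := hbd ml (by omega)
      have hge := hnnf ml 0
      show tA (pvTables (Ls.map (fun x => PySem.Int.mod x 3))).1 ml 0 = 0
      omega

-- ===== VERDICT (by name: the statement is the Claim_ definition above) =====
theorem solution_spec : Claim_equal_solution := by
  intro L _ _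
  unfold Spec_solution
  exact (main_equiv L)

def solution_raises : Claim_raises_solution := by
  unfold Claim_raises_solution
  exact ⟨fun L _ h => by simp [Raises_solution] at h; simp [Pre_solution, h], by decide⟩
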